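-- pv_equiv track=rewrite | github.com/FabricioBartz/TSPEuclidiano | mstkruskal.py | dfs_mst
-- ===== SOURCE A (Python) =====
-- def dfs_mst(mst, inicio=0):
--     visitado = [False] * len(mst)
--     rota = []
--
--     def dfs(u):
--         visitado[u] = True
--         rota.append(u)
--         for v in mst[u]:
--             if not visitado[v]:
--                 dfs(v)
--
--     dfs(inicio)
--     return rota
-- ===== SOURCE B (Python) =====
-- def dfs_mst(mst, inicio=0):
--     visitado = [False] * len(mst)
--     rota = []
--     pilha = [inicio]
--     while pilha:
--         u = pilha.pop()
--         if visitado[u]: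
--             continue
--         visitado[u] = True
--         rota.append(u)
--         pilha.extend(reversed(mst[u]))
--     return rota
-- ===== Notes on version B (the rewrite author's own statement) =====
-- stated objective: alternative
-- what changed: Replaces the recursive DFS (nested dfs closure recursing on each unvisited neighbour) by an iterative DFS with an explicit stack: pop a node, skip it if visited, otherwise mark it, append it to the route and push its neighbours in reverse, which yields the identical preorder route without recursion.
-- outside the precondition, e.g. on dfs_mst({0: [1], 1: [-2]}, 0): A returns [0, 1], B returns [0, 1]
import Mathlib
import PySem

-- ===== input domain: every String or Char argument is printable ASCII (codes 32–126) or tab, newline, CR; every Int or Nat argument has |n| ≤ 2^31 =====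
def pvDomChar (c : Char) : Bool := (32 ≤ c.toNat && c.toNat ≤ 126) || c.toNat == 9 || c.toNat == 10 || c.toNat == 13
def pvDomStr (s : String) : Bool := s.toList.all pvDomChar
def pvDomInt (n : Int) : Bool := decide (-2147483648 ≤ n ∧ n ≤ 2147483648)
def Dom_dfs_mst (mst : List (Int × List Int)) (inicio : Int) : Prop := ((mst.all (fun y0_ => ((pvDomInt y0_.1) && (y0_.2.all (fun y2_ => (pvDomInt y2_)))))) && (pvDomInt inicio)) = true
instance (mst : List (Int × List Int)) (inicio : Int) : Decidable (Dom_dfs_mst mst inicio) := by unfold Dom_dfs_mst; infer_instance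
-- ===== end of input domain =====

-- B replaces A's recursive DFS by an iterative DFS with an explicit stack (same visited-array
-- semantics, same preorder route); objective: alternative decomposition, no speed claim.

-- shared helpers: mst[u] (dict lookup; [] for a missing key, which under Pre_ only ever occurs
-- for nodes the traversal skips) and the number of unvisited slots (B's termination measure)
def pvNbrs (mst : List (Int × List Int)) (u : Int) : List Int :=
  (PySem.Dict.get? ⟨mst⟩ u).getD []

def pvCountFalse (vis : List Bool) : Nat := vis.countP (fun b => !b)

-- cited by B's termination proof: marking an unvisited slot strictly decreases pvCountFalse
theorem pvCount_set_true_lt (xs : List Bool) (j : Nat) (hj : j < xs.length) (hx : xs[j] = false) :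
    (xs.set j true).countP (fun b => !b) < xs.countP (fun b => !b) := by
  induction xs generalizing j with
  | nil => simp at hj
  | cons a xs ih =>
    cases j with
    | zero =>
      subst hx
      simp
    | succ j =>
      simp only [List.set_cons_succ, List.countP_cons]
      have := ih j (by simpa using hj) (by simpa using hx)
      omega

theorem pvCount_pySetD_lt (vis : List Bool) (u : Int)
    (h : PySem.List.pyGet? vis u = some false) :
    pvCountFalse (PySem.List.pySetD vis u true) < pvCountFalse vis := by
  unfold PySem.List.pyGet? at h
  unfold PySem.List.pySetD PySem.List.pySet?
  cases hk : PySem.List.pyIdx? vis.length u with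
  | none => simp [hk] at h
  | some k =>
    rw [hk] at h
    simp only [Option.bind_some] at h
    have hlt : k < vis.length := by
      by_contra hge
      rw [List.getElem?_eq_none (by omega)] at h
      simp at h
    have hval : vis[k] = false := by
      rw [List.getElem?_eq_getElem hlt] at h; exact Option.some.inj h
    simpa [hk, pvCountFalse] using pvCount_set_true_lt vis k hlt hval

-- ===== PORT A =====
-- A's inner recursive dfs(u) (pvDfsA) and its neighbour loop (pvGoA), transliterated.
-- The Python recursion carries no fuel; the port threads a fuel counter only to satisfy the
-- termination checker — dfs_mst passes mst.length + 1, which the proof shows is never exhausted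
-- under Pre_ (each call marks one more slot).  In pvDfsA, 'none' models the IndexError that
-- visitado[u] raises for an out-of-range u (outside Pre_); the 'some true' branch is unreachable
-- from dfs_mst (dfs is only ever invoked on an unvisited node) and is a termination guard.
mutual
def pvDfsA (mst : List (Int × List Int)) : Nat → Int → List Bool × List Int → List Bool × List Int
  | 0, _, s => s
  | fuel + 1, u, (vis, rota) =>
    match PySem.List.pyGet? vis u with
    | some false =>
        pvGoA mst fuel (pvNbrs mst u) (PySem.List.pySetD vis u true, rota ++ [u])
    | _ => (vis, rota)
termination_by fuel _ _ => (fuel, 0)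

def pvGoA (mst : List (Int × List Int)) : Nat → List Int → List Bool × List Int → List Bool × List Int
  | _, [], s => s
  | fuel, v :: vs, (vis, rota) =>
    if PySem.List.pyGet? vis v = some false then
      pvGoA mst fuel vs (pvDfsA mst fuel v (vis, rota))
    else
      pvGoA mst fuel vs (vis, rota)
termination_by fuel xs _ => (fuel, xs.length + 1)
end

def dfs_mst (mst : List (Int × List Int)) (inicio : Int) : List Int :=
  (pvDfsA mst (mst.length + 1) inicio (List.replicate mst.length false, [])).2

-- ===== PORT B =====
-- iterative DFS: the Python list 'pilha' is kept top-first (pilha.pop() is the head;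
-- pilha.extend(reversed(mst[u])) prepends mst[u] in its original order).  'none' models the
-- IndexError of visitado[u] (outside Pre_).
def pvLoopB (mst : List (Int × List Int)) : List Int → List Bool × List Int → List Int
  | [], (_, rota) => rota
  | u :: pilha, (vis, rota) =>
    match h : PySem.List.pyGet? vis u with
    | none => rota
    | some true => pvLoopB mst pilha (vis, rota)
    | some false =>
        pvLoopB mst (pvNbrs mst u ++ pilha) (PySem.List.pySetD vis u true, rota ++ [u])
termination_by xs s => (pvCountFalse s.1, xs.length)
decreasing_by
  · exact Prod.Lex.right _ (Nat.lt_succ_self _)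
  · exact Prod.Lex.left _ _ (pvCount_pySetD_lt vis u h)

def dfs_mst_alt (mst : List (Int × List Int)) (inicio : Int) : List Int :=
  pvLoopB mst [inicio] (List.replicate mst.length false, [])

-- ===== PRECONDITION & SPEC =====
-- the set of nodes reachable from inicio along neighbour lists: one closure step adds every
-- neighbour of a current member, and (#neighbour entries + 1) steps reach the fixpoint — a
-- property of the input graph only (no port is consulted)
def pvStepR (mst : List (Int × List Int)) (S : List Int) : List Int :=
  PySem.Set.update S (S.flatMap (pvNbrs mst))

def pvReach (mst : List (Int × List Int)) (inicio : Int) : List Int :=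
  (pvStepR mst)^[Nat.succ (mst.flatMap (fun p => p.2)).length] [inicio]

-- Pre_ excludes exactly (a) association lists with duplicate keys, which no Python dict input
-- can produce (the dict collapses them, so len(mst) would disagree with the list's length), and
-- (b) inputs from which the traversal can reach a node that is out of range of the visited array,
-- or a non-key node other than a mere alias of its parent's visited slot: on most of those A
-- raises IndexError/KeyError, and on the rest A returns only because negative-index wraparound
-- happens to alias the bad node onto some other visited slot (an accident of the representation;
-- B returns the same value there too — see claim cites).  Negative keys and parent-aliased
-- neighbours stay inside Pre_.
def Pre_dfs_mst (mst : List (Int × List Int)) (inicio : Int) : Prop :=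
  (mst.map Prod.fst).Nodup ∧ inicio ∈ mst.map Prod.fst ∧
  (∀ v ∈ pvReach mst inicio, PySem.Raise.InRange mst.length v) ∧
  (∀ u ∈ pvReach mst inicio, ∀ v ∈ pvNbrs mst u,
    v ∈ mst.map Prod.fst ∨ PySem.List.pyIdx? mst.length v = PySem.List.pyIdx? mst.length u)
instance (mst : List (Int × List Int)) (inicio : Int) : Decidable (Pre_dfs_mst mst inicio) := by
  unfold Pre_dfs_mst; infer_instance

def pvWitness_dfs_mst : (List (Int × List Int)) × Int := ([(0, [1, 2]), (1, []), (2, [1])], 0)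

def Spec_dfs_mst (mst : List (Int × List Int)) (inicio : Int) (out : List Int) : Prop :=
  out = dfs_mst_alt mst inicio
instance (mst : List (Int × List Int)) (inicio : Int) (out : List Int) : Decidable (Spec_dfs_mst mst inicio out) := by unfold Spec_dfs_mst; infer_instance

-- ===== CLAIM (what is proved, stated in full; the proofs are below) =====
def Claim_equal_dfs_mst : Prop := ∀ (mst : List (Int × List Int)) (inicio : Int), Dom_dfs_mst mst inicio → Pre_dfs_mst mst inicio → Spec_dfs_mst mst inicio (dfs_mst mst inicio)

-- ===== LEMMAS AND PROOFS =====


-- every element pvNbrs can return occurs among mst's neighbour entries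
theorem pvNbrs_sub (mst : List (Int × List Int)) (u : Int) :
    ∀ w ∈ pvNbrs mst u, w ∈ mst.flatMap (fun p => p.2) := by
  intro w hw
  unfold pvNbrs at hw
  cases hg : PySem.Dict.get? (⟨mst⟩ : PySem.Dict Int (List Int)) u with
  | none => rw [hg] at hw; simp at hw
  | some l =>
    rw [hg] at hw
    simp only [Option.getD_some] at hw
    unfold PySem.Dict.get? at hg
    cases hf : List.find? (fun p => p.1 == u) mst with
    | none => simp [hf] at hg
    | some p =>
      have hpm : p ∈ mst := List.mem_of_find?_eq_some hf
      have : p.2 = l := by simpa [hf] using hg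
      exact List.mem_flatMap.2 ⟨p, hpm, this ▸ hw⟩

-- membership in PySem.Set.update, both directions
theorem pvMem_update_left {s : List Int} (xs : List Int) {x : Int} (h : x ∈ s) :
    x ∈ PySem.Set.update s xs := by
  induction xs generalizing s with
  | nil => exact h
  | cons a xs ih => exact ih ((PySem.Set.mem_add s a x).2 (Or.inl h))

theorem pvMem_update_right {s xs : List Int} {x : Int} (h : x ∈ xs) :
    x ∈ PySem.Set.update s xs := by
  induction xs generalizing s with
  | nil => simp at h
  | cons a xs ih =>
    rcases List.mem_cons.1 h with rfl | h'
    · exact pvMem_update_left xs ((PySem.Set.mem_add s x x).2 (Or.inr rfl))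
    · exact ih h'

theorem pvMem_update_cases {s xs : List Int} {x : Int} (h : x ∈ PySem.Set.update s xs) :
    x ∈ s ∨ x ∈ xs := by
  induction xs generalizing s with
  | nil => exact Or.inl h
  | cons a xs ih =>
    rcases ih h with h' | h'
    · rcases (PySem.Set.mem_add s a x).1 h' with h'' | rfl
      · exact Or.inl h''
      · exact Or.inr (List.mem_cons_self ..)
    · exact Or.inr (List.mem_cons_of_mem a h')

-- Set.update only appends
theorem pvUpdate_append (s xs : List Int) : ∃ t, PySem.Set.update s xs = s ++ t := by
  induction xs generalizing s with
  | nil => exact ⟨[], by simp [PySem.Set.update]⟩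
  | cons a xs ih =>
    show ∃ t, PySem.Set.update (PySem.Set.add s a) xs = s ++ t
    obtain ⟨t, ht⟩ := ih (s := PySem.Set.add s a)
    by_cases hc : a ∈ s
    · refine ⟨t, ?_⟩
      rw [ht]
      simp [PySem.Set.add, hc]
    · refine ⟨[a] ++ t, ?_⟩
      rw [ht]
      simp [PySem.Set.add, hc]

theorem pvStepR_ne_length {mst : List (Int × List Int)} {S : List Int}
    (h : pvStepR mst S ≠ S) : S.length + 1 ≤ (pvStepR mst S).length := by
  obtain ⟨t, ht⟩ := pvUpdate_append S (S.flatMap (pvNbrs mst))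
  unfold pvStepR at *
  cases t with
  | nil => exact absurd (by simpa using ht) h
  | cons b tb => rw [ht]; simp

theorem pvStepR_nodup {mst : List (Int × List Int)} {S : List Int} (h : S.Nodup) :
    (pvStepR mst S).Nodup := PySem.Set.nodup_update S _ h

theorem pvStepR_univ {mst : List (Int × List Int)} {S : List Int} {inicio : Int}
    (h : ∀ x ∈ S, x ∈ inicio :: mst.flatMap (fun p => p.2)) :
    ∀ x ∈ pvStepR mst S, x ∈ inicio :: mst.flatMap (fun p => p.2) := by
  intro x hx
  rcases pvMem_update_cases hx with h' | h'
  · exact h x h'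
  · obtain ⟨v, _, hw⟩ := List.mem_flatMap.1 h'
    exact List.mem_cons_of_mem _ (pvNbrs_sub mst v x hw)

-- after (#neighbour entries + 1) steps the closure is a fixpoint
theorem pvReach_fix (mst : List (Int × List Int)) (inicio : Int) :
    pvStepR mst (pvReach mst inicio) = pvReach mst inicio := by
  set N := Nat.succ (mst.flatMap (fun p => p.2)).length with hN
  set g := pvStepR mst with hg
  -- every iterate is nodup and lives in the universe inicio :: all neighbour entries
  have huniv : ∀ k, ∀ x ∈ g^[k] [inicio], x ∈ inicio :: mst.flatMap (fun p => p.2) := by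
    intro k
    induction k with
    | zero =>
      intro x hx
      simp only [Function.iterate_zero, id] at hx
      rcases List.mem_cons.1 hx with rfl | hx
      · exact List.mem_cons_self ..
      · simp at hx
    | succ k ih =>
      rw [Function.iterate_succ_apply']
      exact pvStepR_univ ih
  have hnodup : ∀ k, (g^[k] [inicio]).Nodup := by
    intro k
    induction k with
    | zero => simp
    | succ k ih => rw [Function.iterate_succ_apply']; exact pvStepR_nodup ih
  have hlenbound : ∀ k, (g^[k] [inicio]).length ≤ N := by
    intro k
    calc (g^[k] [inicio]).length
        = (g^[k] [inicio]).toFinset.card := (List.toFinset_card_of_nodup (hnodup k)).symm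
      _ ≤ (inicio :: mst.flatMap (fun p => p.2)).toFinset.card := by
          apply Finset.card_le_card
          intro x hx
          exact List.mem_toFinset.2 (huniv k x (List.mem_toFinset.1 hx))
      _ ≤ N := by
          rw [hN]
          simpa using List.toFinset_card_le (inicio :: mst.flatMap (fun p => p.2))
  -- some iterate below N is already a fixpoint
  have hfix : ∃ k, k < N ∧ g (g^[k] [inicio]) = g^[k] [inicio] := by
    by_contra hcon
    push Not at hcon
    have hgrow : ∀ k, k ≤ N → k + 1 ≤ (g^[k] [inicio]).length := by
      intro k
      induction k with
      | zero => intro _; simp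
      | succ k ih =>
        intro hk
        have h1 := ih (by omega)
        have h2 := pvStepR_ne_length (mst := mst) (S := g^[k] [inicio]) (hcon k (by omega))
        rw [← hg] at h2
        rw [Function.iterate_succ_apply']
        omega
    have := hgrow N le_rfl
    have := hlenbound N
    omega
  obtain ⟨k, hk, hfixk⟩ := hfix
  have hstable : ∀ m, g^[m] (g^[k] [inicio]) = g^[k] [inicio] := by
    intro m
    induction m with
    | zero => rfl
    | succ m ih => rw [Function.iterate_succ_apply', ih, hfixk]
  have hNk : g^[N] [inicio] = g^[k] [inicio] := by
    have : g^[N - k + k] [inicio] = g^[N - k] (g^[k] [inicio]) := Function.iterate_add_apply g _ k [inicio]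
    rw [Nat.sub_add_cancel (by omega)] at this
    rw [this, hstable]
  show g (g^[N] [inicio]) = g^[N] [inicio]
  rw [hNk, hfixk]

theorem pvReach_self (mst : List (Int × List Int)) (inicio : Int) :
    inicio ∈ pvReach mst inicio := by
  unfold pvReach
  induction (Nat.succ (mst.flatMap (fun p => p.2)).length) with
  | zero => simp
  | succ k ih => rw [Function.iterate_succ_apply']; exact pvMem_update_left _ ih

theorem pvReach_closed (mst : List (Int × List Int)) (inicio : Int) {v w : Int}
    (hv : v ∈ pvReach mst inicio) (hw : w ∈ pvNbrs mst v) : w ∈ pvReach mst inicio := by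
  have : w ∈ pvStepR mst (pvReach mst inicio) :=
    pvMem_update_right (List.mem_flatMap.2 ⟨v, hv, hw⟩)
  rwa [pvReach_fix] at this

-- pvDfsA / pvGoA preserve the length of the visited array and never decrease ... increase the
-- number of visited slots (pvCountFalse is non-increasing)
theorem pvA_inv (mst : List (Int × List Int)) : ∀ fuel : Nat,
    (∀ u vis rota, (pvDfsA mst fuel u (vis, rota)).1.length = vis.length ∧
      pvCountFalse (pvDfsA mst fuel u (vis, rota)).1 ≤ pvCountFalse vis) ∧
    (∀ xs vis rota, (pvGoA mst fuel xs (vis, rota)).1.length = vis.length ∧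
      pvCountFalse (pvGoA mst fuel xs (vis, rota)).1 ≤ pvCountFalse vis) := by
  intro fuel
  induction fuel using Nat.strong_induction_on with
  | _ fuel IH =>
  have Hdfs : ∀ u vis rota, (pvDfsA mst fuel u (vis, rota)).1.length = vis.length ∧
      pvCountFalse (pvDfsA mst fuel u (vis, rota)).1 ≤ pvCountFalse vis := by
    intro u vis rota
    cases fuel with
    | zero => simp [pvDfsA]
    | succ f =>
      cases hg : PySem.List.pyGet? vis u with
      | none => simp [pvDfsA, hg]
      | some b =>
        cases b with
        | true => simp [pvDfsA, hg]
        | false =>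
          have hset := (IH f (Nat.lt_succ_self f)).2 (pvNbrs mst u)
            (PySem.List.pySetD vis u true) (rota ++ [u])
          have hc := pvCount_pySetD_lt vis u hg
          have hl : (PySem.List.pySetD vis u true).length = vis.length :=
            PySem.List.length_pySetD vis u true
          simp only [pvDfsA, hg]
          exact ⟨hset.1.trans hl, hset.2.trans (by omega)⟩
  refine ⟨Hdfs, ?_⟩
  intro xs
  induction xs with
  | nil => intro vis rota; simp [pvGoA]
  | cons v vs ih =>
    intro vis rota
    by_cases hg : PySem.List.pyGet? vis v = some false
    · have h1 := Hdfs v vis rota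
      rcases hd : pvDfsA mst fuel v (vis, rota) with ⟨vis2, rota2⟩
      rw [hd] at h1
      have h2 := ih vis2 rota2
      simp only [pvGoA, if_pos hg, hd]
      exact ⟨h2.1.trans h1.1, h2.2.trans h1.2⟩
    · simp only [pvGoA, if_neg hg]
      exact ih vis rota


theorem pvLoopB_cons_true (mst : List (Int × List Int)) (u : Int) (p : List Int)
    (vis : List Bool) (rota : List Int) (h : PySem.List.pyGet? vis u = some true) :
    pvLoopB mst (u :: p) (vis, rota) = pvLoopB mst p (vis, rota) := by
  simp only [pvLoopB]
  split <;> simp_all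

theorem pvLoopB_cons_false (mst : List (Int × List Int)) (u : Int) (p : List Int)
    (vis : List Bool) (rota : List Int) (h : PySem.List.pyGet? vis u = some false) :
    pvLoopB mst (u :: p) (vis, rota)
      = pvLoopB mst (pvNbrs mst u ++ p) (PySem.List.pySetD vis u true, rota ++ [u]) := by
  simp only [pvLoopB]
  split <;> simp_all

-- MAIN LEMMA: running B's stack loop on xs ++ rest is running A's neighbour loop on xs and then
-- B's loop on rest — with enough fuel, a visited array of the right length and in-range xs
theorem pvMain (mst : List (Int × List Int)) (R : List Int)
    (hR : ∀ v ∈ R, PySem.Raise.InRange mst.length v)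
    (hcl : ∀ v ∈ R, ∀ w ∈ pvNbrs mst v, w ∈ R) :
    ∀ fuel : Nat, ∀ xs rest vis rota,
    pvCountFalse vis < fuel → vis.length = mst.length →
    (∀ v ∈ xs, v ∈ R) →
    pvLoopB mst (xs ++ rest) (vis, rota) = pvLoopB mst rest (pvGoA mst fuel xs (vis, rota)) := by
  intro fuel
  induction fuel using Nat.strong_induction_on with
  | _ fuel IHf =>
  intro xs
  induction xs with
  | nil => intro rest vis rota _ _ _; simp [pvGoA]
  | cons v vs ih =>
    intro rest vis rota hfuel hlen hxs
    have hv := hxs v (List.mem_cons_self ..)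
    have hsome : ∃ b, PySem.List.pyGet? vis v = some b := by
      cases hb : PySem.List.pyGet? vis v with
      | none => exact absurd ((PySem.List.pyGet?_eq_none_iff vis v).1 hb) (by rw [hlen]; exact fun hc => hc (hR v hv))
      | some b => exact ⟨b, rfl⟩
    obtain ⟨b, hidx⟩ := hsome
    cases b with
    | true =>
      have hne : ¬ PySem.List.pyGet? vis v = some false := by simp [hidx]
      calc pvLoopB mst ((v :: vs) ++ rest) (vis, rota)
          = pvLoopB mst (vs ++ rest) (vis, rota) := by
            rw [List.cons_append, pvLoopB_cons_true mst v _ _ _ hidx]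
        _ = pvLoopB mst rest (pvGoA mst fuel vs (vis, rota)) :=
            ih rest vis rota hfuel hlen (fun w hw => hxs w (List.mem_cons_of_mem v hw))
        _ = pvLoopB mst rest (pvGoA mst fuel (v :: vs) (vis, rota)) := by
            rw [pvGoA, if_neg hne]
    | false =>
      obtain ⟨f, rfl⟩ : ∃ f, fuel = f + 1 := ⟨fuel - 1, by omega⟩
      have hcset := pvCount_pySetD_lt vis v hidx
      have hlset : (PySem.List.pySetD vis v true).length = vis.length :=
        PySem.List.length_pySetD vis v true
      -- the marked state after popping v
      have step1 : pvLoopB mst ((v :: vs) ++ rest) (vis, rota)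
          = pvLoopB mst (pvNbrs mst v ++ (vs ++ rest))
              (PySem.List.pySetD vis v true, rota ++ [v]) := by
        rw [List.cons_append, pvLoopB_cons_false mst v _ _ _ hidx]
      have step2 : pvLoopB mst (pvNbrs mst v ++ (vs ++ rest))
              (PySem.List.pySetD vis v true, rota ++ [v])
          = pvLoopB mst (vs ++ rest)
              (pvGoA mst f (pvNbrs mst v) (PySem.List.pySetD vis v true, rota ++ [v])) :=
        IHf f (Nat.lt_succ_self f) (pvNbrs mst v) (vs ++ rest) _ _
          (by omega) (hlset.trans hlen) (fun w hw => hcl v hv w hw)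
      have hdfs : pvGoA mst f (pvNbrs mst v) (PySem.List.pySetD vis v true, rota ++ [v])
          = pvDfsA mst (f + 1) v (vis, rota) := by
        simp only [pvDfsA, hidx]
      rcases hd : pvDfsA mst (f + 1) v (vis, rota) with ⟨vis2, rota2⟩
      have hinv := (pvA_inv mst (f + 1)).1 v vis rota
      rw [hd] at hinv
      have hinvl : vis2.length = vis.length := hinv.1
      have hinvc : pvCountFalse vis2 ≤ pvCountFalse vis := hinv.2
      have step3 : pvLoopB mst (vs ++ rest) (vis2, rota2)
          = pvLoopB mst rest (pvGoA mst (f + 1) vs (vis2, rota2)) :=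
        ih rest vis2 rota2 (by omega) (hinvl.trans hlen)
          (fun w hw => hxs w (List.mem_cons_of_mem v hw))
      calc pvLoopB mst ((v :: vs) ++ rest) (vis, rota)
          = pvLoopB mst (vs ++ rest) (vis2, rota2) := by
            rw [step1, step2, hdfs, hd]
        _ = pvLoopB mst rest (pvGoA mst (f + 1) vs (vis2, rota2)) := step3
        _ = pvLoopB mst rest (pvGoA mst (f + 1) (v :: vs) (vis, rota)) := by
            rw [pvGoA, if_pos hidx, hd]

-- ===== VERDICT =====
theorem dfs_mst_spec : Claim_equal_dfs_mst := by
  intro mst inicio _hdom hpre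
  obtain ⟨_hnd, _hkey, hR, _halias⟩ := hpre
  have hcl : ∀ v ∈ pvReach mst inicio, ∀ w ∈ pvNbrs mst v, w ∈ pvReach mst inicio :=
    fun v hv w hw => pvReach_closed mst inicio hv hw
  have hin : PySem.Raise.InRange mst.length inicio := hR inicio (pvReach_self mst inicio)
  unfold Spec_dfs_mst dfs_mst dfs_mst_alt
  set n := mst.length with hnn
  have hcount : pvCountFalse (List.replicate n false) = n := by
    simp [pvCountFalse, List.countP_replicate]
  have hidx : PySem.List.pyGet? (List.replicate n false) inicio = some false := by
    cases hb : PySem.List.pyGet? (List.replicate n false) inicio with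
    | none =>
      exact absurd ((PySem.List.pyGet?_eq_none_iff _ inicio).1 hb)
        (by rw [List.length_replicate]; exact fun hc => hc hin)
    | some b =>
      rw [List.eq_of_mem_replicate (PySem.List.mem_of_pyGet?_eq_some _ hb)]
  have hmain := pvMain mst (pvReach mst inicio) hR hcl (n + 1) [inicio] [] (List.replicate n false) []
    (by omega) (by rw [List.length_replicate])
    (by intro w hw; simp at hw; rw [hw]; exact pvReach_self mst inicio)
  have hgo : pvGoA mst (n + 1) [inicio] (List.replicate n false, [])
      = pvDfsA mst (n + 1) inicio (List.replicate n false, []) := by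
    rw [pvGoA, if_pos hidx]
    rcases pvDfsA mst (n + 1) inicio (List.replicate n false, []) with ⟨vis2, rota2⟩
    rw [pvGoA]
  rw [hgo] at hmain
  rcases hd : pvDfsA mst (n + 1) inicio (List.replicate n false, []) with ⟨vis2, rota2⟩
  rw [hd] at hmain
  simp only [List.append_nil] at hmain
  rw [hmain]
  simp [pvLoopB]
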